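-- pv_equiv track=rewrite | github.com/Jasperb3/FinanGPT | src/query_engine/query.py | split_select_expressions
-- ===== SOURCE A (Python) =====
-- from typing import Any, Dict, Iterable, List, Mapping, Optional, Sequence, Set
--
-- def split_select_expressions(clause: str) -> List[str]:
--     expressions = []
--     current = []
--     depth = 0
--     for char in clause:
--         if char == "(":
--             depth += 1
--         elif char == ")":
--             depth = max(0, depth - 1)
--         if char == "," and depth == 0:
--             expr = "".join(current).strip()
--             if expr:
--                 expressions.append(expr)
--             current = []
--             continue
--         current.append(char)
--     tail = "".join(current).strip()
--     if tail:
--         expressions.append(tail)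
--     return expressions
-- ===== SOURCE B (Python) =====
-- def split_select_expressions(clause):
--     fragments = clause.split(',')
--     expressions = []
--     group = []
--     depth = 0
--     for frag in fragments:
--         for ch in frag:
--             if ch == '(':
--                 depth += 1
--             elif ch == ')':
--                 depth = max(0, depth - 1)
--         group.append(frag)
--         if depth == 0:
--             expr = ','.join(group).strip()
--             if expr:
--                 expressions.append(expr)
--             group = []
--     if group:
--         expr = ','.join(group).strip()
--         if expr:
--             expressions.append(expr)
--     return expressions
-- ===== Notes on version B (the rewrite author's own statement) =====
-- stated objective: alternative
-- what changed: Replaces A's single fused character scan (building the current expression char by char and cutting at depth-0 commas) with a two-stage tokenize-then-regroup pass: split on every comma first, then fold over the fragments tracking paren depth and re-join fragment groups with commas when depth returns to 0; the bulk split/join work moves into C-level str methods.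
import Mathlib
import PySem

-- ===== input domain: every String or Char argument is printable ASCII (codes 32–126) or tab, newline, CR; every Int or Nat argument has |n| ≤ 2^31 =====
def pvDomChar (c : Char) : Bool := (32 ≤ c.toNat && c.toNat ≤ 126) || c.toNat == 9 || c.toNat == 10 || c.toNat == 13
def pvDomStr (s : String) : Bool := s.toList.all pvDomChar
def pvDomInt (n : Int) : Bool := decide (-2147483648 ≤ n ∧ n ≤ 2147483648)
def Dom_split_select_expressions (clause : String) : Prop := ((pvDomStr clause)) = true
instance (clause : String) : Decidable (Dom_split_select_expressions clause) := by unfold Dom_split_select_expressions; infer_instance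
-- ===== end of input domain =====

-- B replaces A's fused per-character scan with a split-on-comma then regroup-by-paren-depth pass (alternative decomposition, same cost).

-- ===== PORT A =====
-- one iteration of A's `for char in clause` loop; state = (expressions, current, depth)
def ssA_step (st : List String × List Char × Int) (c : Char) : List String × List Char × Int :=
  let es := st.1
  let cur := st.2.1
  let depth := st.2.2
  let depth := if c = '(' then depth + 1 else if c = ')' then max 0 (depth - 1) else depth
  if c = ',' ∧ depth = 0 then
    let expr := PySem.Chars.strip cur
    (if expr ≠ [] then es ++ [String.ofList expr] else es, [], depth)
  else
    (es, cur ++ [c], depth)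

def split_select_expressions (clause : String) : List String :=
  let st := clause.toList.foldl ssA_step ([], [], 0)
  let tail := PySem.Chars.strip st.2.1
  if tail ≠ [] then st.1 ++ [String.ofList tail] else st.1

-- ===== PORT B =====
-- `for ch in frag` depth update of Source B
def ssB_depth (d : Int) (frag : List Char) : Int :=
  frag.foldl (fun d c => if c = '(' then d + 1 else if c = ')' then max 0 (d - 1) else d) d

-- one iteration of Source B's `for frag in fragments` loop; state = (expressions, group, depth)
def ssB_step (st : List String × List (List Char) × Int) (frag : List Char) :
    List String × List (List Char) × Int :=
  let es := st.1
  let group := st.2.1 ++ [frag]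
  let depth := ssB_depth st.2.2 frag
  if depth = 0 then
    let expr := PySem.Chars.strip (PySem.Chars.join [','] group)
    (if expr ≠ [] then es ++ [String.ofList expr] else es, [], 0)
  else
    (es, group, depth)

def split_select_expressions_alt (clause : String) : List String :=
  let fragments := clause.toList.splitOn ','   -- clause.split(',')
  let st := fragments.foldl ssB_step ([], [], 0)
  if st.2.1 ≠ [] then
    let expr := PySem.Chars.strip (PySem.Chars.join [','] st.2.1)
    if expr ≠ [] then st.1 ++ [String.ofList expr] else st.1
  else st.1

-- ===== PRECONDITION & SPEC =====
def Spec_split_select_expressions (clause : String) (out : List String) : Prop := out = split_select_expressions_alt clause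
instance (clause : String) (out : List String) : Decidable (Spec_split_select_expressions clause out) := by unfold Spec_split_select_expressions; infer_instance

-- ===== CLAIM (what is proved, stated in full; the proofs are below) =====
def Claim_equal_split_select_expressions : Prop := ∀ (clause : String), Dom_split_select_expressions clause → Spec_split_select_expressions clause (split_select_expressions clause)

-- ===== LEMMAS AND PROOFS =====

theorem strip_nil : PySem.Chars.strip [] = [] := by decide

theorem ssB_depth_nil (d : Int) : ssB_depth d [] = d := rfl

theorem join_singleton (f : List Char) : PySem.Chars.join [','] [f] = f := by
  simp [PySem.Chars.join, List.intercalate]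

-- A's flush of the accumulated characters
def ssFlush (es : List String) (cur : List Char) : List String :=
  if PySem.Chars.strip cur ≠ [] then es ++ [String.ofList (PySem.Chars.strip cur)] else es

theorem ssA_step_ne_comma (es : List String) (cur : List Char) (d : Int) (c : Char)
    (h : c ≠ ',') :
    ssA_step (es, cur, d) c =
      (es, cur ++ [c], if c = '(' then d + 1 else if c = ')' then max 0 (d - 1) else d) := by
  simp [ssA_step, h]

-- processing a comma-free fragment in A just appends it and updates the depth
theorem ssA_frag (f : List Char) : ∀ (es : List String) (cur : List Char) (d : Int),
    (',' ∉ f) →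
    f.foldl ssA_step (es, cur, d) = (es, cur ++ f, ssB_depth d f) := by
  induction f with
  | nil => intro es cur d _; simp [ssB_depth]
  | cons c t ih =>
    intro es cur d h
    have hc : c ≠ ',' := fun hh => h (hh ▸ List.mem_cons_self)
    have ht : ',' ∉ t := fun hh => h (List.mem_cons_of_mem _ hh)
    simp only [List.foldl_cons, ssA_step_ne_comma es cur d c hc, ih _ _ _ ht,
      List.append_assoc, List.cons_append, List.nil_append, ssB_depth, List.foldl_cons]

-- processing `',' :: f` in A: flush (at depth 0) or keep the comma
theorem ssA_block (f : List Char) (es : List String) (cur : List Char) (d : Int)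
    (hf : ',' ∉ f) :
    (',' :: f).foldl ssA_step (es, cur, d) =
      if d = 0 then (ssFlush es cur, f, ssB_depth 0 f)
      else (es, cur ++ ',' :: f, ssB_depth d f) := by
  have hstep : ssA_step (es, cur, d) ',' =
      if d = 0 then (ssFlush es cur, [], 0) else (es, cur ++ [','], d) := by
    simp only [ssA_step, ssFlush]
    split_ifs with h1 h2 h3 <;> simp_all
  rw [List.foldl_cons, hstep]
  by_cases hd : d = 0 <;>
    simp [hd, ssA_frag f _ _ _ hf]

theorem join_append_singleton (g : List (List Char)) (f : List Char) (hg : g ≠ []) :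
    PySem.Chars.join [','] (g ++ [f]) = PySem.Chars.join [','] g ++ ',' :: f := by
  induction g with
  | nil => simp at hg
  | cons h t ih =>
    cases t with
    | nil => simp [PySem.Chars.join, List.intercalate]
    | cons h' t' =>
      have := ih (by simp)
      simp only [PySem.Chars.join, List.intercalate] at this ⊢
      simp_all [List.intersperse]

-- B's final flush of a leftover group equals A's flush of the joined characters
theorem finish_eq (es : List String) (g : List (List Char)) :
    (if g ≠ [] then
        (if PySem.Chars.strip (PySem.Chars.join [','] g) ≠ [] then
            es ++ [String.ofList (PySem.Chars.strip (PySem.Chars.join [','] g))] else es)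
      else es) = ssFlush es (PySem.Chars.join [','] g) := by
  cases g with
  | nil => simp [ssFlush, PySem.Chars.join, List.intercalate, PySem.Chars.strip,
      PySem.Chars.lstrip, PySem.Chars.rstrip]
  | cons h t => simp [ssFlush]

-- core correspondence: boundary = A has consumed a fragment (but not the following comma),
-- B has appended that fragment to its group (but not yet run the depth-0 check)
theorem ss_main (fs : List (List Char)) :
    ∀ (es : List String) (g : List (List Char)) (d : Int), g ≠ [] →
    (∀ f ∈ fs, ',' ∉ f) →
    (let st := (fs.flatMap (fun f => ',' :: f)).foldl ssA_step (es, PySem.Chars.join [','] g, d)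
     if PySem.Chars.strip st.2.1 ≠ [] then st.1 ++ [String.ofList (PySem.Chars.strip st.2.1)] else st.1)
    =
    (let st := fs.foldl ssB_step
        (if ssB_depth d [] = 0 then
            (ssFlush es (PySem.Chars.join [','] g), ([] : List (List Char)), (0 : Int))
          else (es, g, d))
     if st.2.1 ≠ [] then
        (if PySem.Chars.strip (PySem.Chars.join [','] st.2.1) ≠ [] then
            st.1 ++ [String.ofList (PySem.Chars.strip (PySem.Chars.join [','] st.2.1))] else st.1)
      else st.1) := by
  induction fs with
  | nil =>
    intro es g d hg _
    simp only [List.flatMap_nil, List.foldl_nil, ssB_depth, List.foldl_nil]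
    rw [finish_eq]
    by_cases hd : d = 0 <;> simp [hd, ssFlush, strip_nil]
  | cons f fs ih =>
    intro es g d hg hcf
    have hf : ',' ∉ f := hcf f List.mem_cons_self
    have hfs : ∀ x ∈ fs, ',' ∉ x := fun x hx => hcf x (List.mem_cons_of_mem _ hx)
    simp only [List.flatMap_cons, List.foldl_append]
    rw [ssA_block f es _ d hf]
    simp only [ssB_depth, List.foldl_nil]
    by_cases hd : d = 0
    · -- A flushes at the comma; B flushed the group in its depth-0 check
      subst hd
      have hB : ssB_step (ssFlush es (PySem.Chars.join [','] g), ([] : List (List Char)), (0:Int)) f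
          = (if ssB_depth 0 f = 0 then
              (ssFlush (ssFlush es (PySem.Chars.join [','] g)) (PySem.Chars.join [','] [f]),
                ([] : List (List Char)), (0:Int))
            else (ssFlush es (PySem.Chars.join [','] g), [f], ssB_depth 0 f)) := by
        simp only [ssB_step, ssFlush, List.nil_append, join_singleton]
      have := ih (ssFlush es (PySem.Chars.join [','] g)) [f] (ssB_depth 0 f) (by simp) hfs
      simpa [hB, ssB_depth_nil, join_singleton] using this
    · -- depth ≠ 0: the comma stays inside the expression; B keeps growing the group
      have hB : ssB_step (es, g, d) f
          = (if ssB_depth d f = 0 then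
              (ssFlush es (PySem.Chars.join [','] (g ++ [f])), ([] : List (List Char)), (0:Int))
            else (es, g ++ [f], ssB_depth d f)) := by
        simp only [ssB_step, ssFlush]
      have := ih es (g ++ [f]) (ssB_depth d f) (by simp) hfs
      rw [join_append_singleton g f hg] at this
      simpa [hd, hB, ssB_depth_nil, join_append_singleton g f hg] using this

-- every piece produced by `splitOnP` contains no character satisfying the predicate
theorem splitOnP_pieces {α : Type} (p : α → Bool) (xs : List α) :
    ∀ l ∈ xs.splitOnP p, ∀ a ∈ l, ¬ p a := by
  induction xs with
  | nil => simp [List.splitOnP_nil]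
  | cons x t ih =>
    rw [List.splitOnP_cons]
    by_cases hx : p x
    · simp only [hx, if_pos]
      intro l hl
      rcases List.mem_cons.mp hl with h | h
      · subst h; simp
      · exact ih l h
    · simp only [hx, Bool.false_eq_true, if_neg, not_false_iff]
      rcases hh : t.splitOnP p with - | ⟨h0, t0⟩
      · exact absurd hh (List.splitOnP_ne_nil p t)
      · intro l hl
        simp only [List.modifyHead] at hl
        rcases List.mem_cons.mp hl with h | h
        · subst h
          intro a ha
          rcases List.mem_cons.mp ha with h | h
          · simpa [h] using hx
          · exact ih h0 (hh ▸ List.mem_cons_self) a h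
        · exact ih l (hh ▸ List.mem_cons_of_mem _ h)

theorem splitOn_pieces (xs : List Char) :
    ∀ l ∈ xs.splitOn ',', ',' ∉ l := by
  intro l hl hm
  exact splitOnP_pieces (· == ',') xs l hl ',' hm (by simp)

-- ===== VERDICT (by name: the statement is the Claim_ definition above) =====
theorem split_select_expressions_spec : Claim_equal_split_select_expressions := by
  intro clause _
  unfold Spec_split_select_expressions split_select_expressions split_select_expressions_alt
  rcases hsp : clause.toList.splitOn ',' with - | ⟨f0, fs⟩
  · exact absurd hsp (List.splitOnP_ne_nil _ _)
  · have hpieces : ∀ l ∈ clause.toList.splitOn ',', ',' ∉ l := splitOn_pieces _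
    have hf0 : ',' ∉ f0 := hpieces f0 (hsp ▸ List.mem_cons_self)
    have hfs : ∀ x ∈ fs, ',' ∉ x := fun x hx => hpieces x (hsp ▸ List.mem_cons_of_mem _ hx)
    have hrec : clause.toList = f0 ++ fs.flatMap (fun f => ',' :: f) := by
      have h := List.intercalate_splitOn (xs := clause.toList) ','
      rw [hsp] at h
      rw [← h]
      clear h hsp hfs
      induction fs with
      | nil => simp [List.intercalate]
      | cons g gs ihg =>
        simp only [List.intercalate, List.intersperse, List.flatten] at ihg ⊢
        cases gs <;> simp_all [List.intersperse, List.flatten]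
    rw [hrec]
    simp only [List.foldl_append, List.foldl_cons]
    rw [ssA_frag f0 [] [] 0 hf0]
    have hB0 : ssB_step ([], [], 0) f0
        = (if ssB_depth 0 f0 = 0 then
            (ssFlush [] (PySem.Chars.join [','] [f0]), ([] : List (List Char)), (0:Int))
          else ([], [f0], ssB_depth 0 f0)) := by
      simp only [ssB_step, ssFlush, List.nil_append, join_singleton]
    have := ss_main fs [] [f0] (ssB_depth 0 f0) (by simp) hfs
    simpa [hB0, ssB_depth_nil, join_singleton] using this
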